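-- pv_equiv track=rewrite | github.com/sergree/DolboNet | core/tokenizer.py | trigramize
-- ===== SOURCE A (Python) =====
-- def trigramize(word):
--     trigrams = []
--     for idx, char in enumerate(word):
--         if idx == 0:
--             first = "*"
--         else:
--             first = word[idx - 1]
--         second = char
--         if idx == len(word) - 1:
--             third = "*"
--         else:
--             third = word[idx + 1]
--         trigrams.append(first + second + third)
--     return trigrams
-- ===== SOURCE B (Python) =====
-- def trigramize(word):
--     trigrams = []
--     prev = None
--     cur = "*"
--     for ch in word:
--         if prev is not None:
--             trigrams.append(prev + cur + ch)
--         prev, cur = cur, ch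
--     if prev is not None:
--         trigrams.append(prev + cur + "*")
--     return trigrams
-- ===== Notes on version B (the rewrite author's own statement) =====
-- stated objective: alternative
-- what changed: B streams over the characters once with a two-character lag (prev, cur) and emits each trigram one step late when its third character arrives (the last trigram after the loop with '*'), so it never indexes the word or tests index boundaries, unlike A's random-access word[idx-1]/word[idx+1] with per-index branches.
import Mathlib
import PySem

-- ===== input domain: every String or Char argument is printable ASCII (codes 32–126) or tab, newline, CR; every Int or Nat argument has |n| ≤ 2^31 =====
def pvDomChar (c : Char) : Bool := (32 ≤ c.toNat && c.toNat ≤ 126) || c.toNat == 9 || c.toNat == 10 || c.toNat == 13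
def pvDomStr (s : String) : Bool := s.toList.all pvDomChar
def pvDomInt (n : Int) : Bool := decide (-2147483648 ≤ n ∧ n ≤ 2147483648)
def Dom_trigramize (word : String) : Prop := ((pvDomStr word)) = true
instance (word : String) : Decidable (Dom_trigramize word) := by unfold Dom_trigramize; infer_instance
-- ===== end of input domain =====

-- B streams over the characters once with a two-character lag, emitting each trigram when its
-- third character arrives; no indexing and no per-index boundary branches (alternative decomposition).

-- ===== PORT A =====
-- loop over enumerate(word); word[idx-1]/word[idx+1] are always in range there, ported with pyGetD
def trigramize (word : String) : List String :=
  let cs := word.toList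
  (PySem.List.enumerate cs).foldl (fun trigrams p =>
    let first : List Char := if p.1 = 0 then ['*'] else [PySem.List.pyGetD cs (p.1 - 1) ' ']
    let third : List Char := if p.1 = (cs.length : Int) - 1 then ['*'] else [PySem.List.pyGetD cs (p.1 + 1) ' ']
    trigrams ++ [String.ofList (first ++ [p.2] ++ third)]) []

-- ===== PORT B =====
-- the loop body of Source B: state = (trigrams, prev, cur); 'prev is None' is Option.none
def triStep (s : List String × Option Char × Char) (ch : Char) : List String × Option Char × Char :=
  match s.2.1 with
  | some p => (s.1 ++ [String.ofList [p, s.2.2, ch]], some s.2.2, ch)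
  | none => (s.1, some s.2.2, ch)

def trigramize_alt (word : String) : List String :=
  let st := word.toList.foldl triStep ([], none, '*')
  match st.2.1 with
  | some p => st.1 ++ [String.ofList [p, st.2.2, '*']]
  | none => st.1

-- ===== PRECONDITION & SPEC =====
def Spec_trigramize (word : String) (out : List String) : Prop := out = trigramize_alt word
instance (word : String) (out : List String) : Decidable (Spec_trigramize word out) := by unfold Spec_trigramize; infer_instance

-- ===== CLAIM (what is proved, stated in full; the proofs are below) =====
def Claim_equal_trigramize : Prop := ∀ (word : String), Dom_trigramize word → Spec_trigramize word (trigramize word)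

-- ===== LEMMAS AND PROOFS =====

-- common reference form: trigrams of cur :: l with sentinel prev char p, closed structurally
def tri (p : Char) : List Char → List String
  | [] => []
  | c :: l => String.ofList [p, c, l.headD '*'] :: tri c l

-- padded-window form, generalized over the left pad
def zw (p : Char) (cs : List Char) : List String :=
  let padded := p :: cs ++ ['*']
  (padded.zip (padded.tail.zip padded.tail.tail)).map (fun q => String.ofList [q.1, q.2.1, q.2.2])

def lastTwo (p cur : Char) : List Char → Char × Char
  | [] => (p, cur)
  | c :: l => lastTwo cur c l

def win (p cur : Char) : List Char → List String
  | [] => []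
  | c :: l => String.ofList [p, cur, c] :: win cur c l

theorem fold_inv (l : List Char) : ∀ (p cur : Char) (out : List String),
    l.foldl triStep (out, some p, cur) =
      (out ++ win p cur l, some (lastTwo p cur l).1, (lastTwo p cur l).2) := by
  induction l with
  | nil => intro p cur out; simp [win, lastTwo]
  | cons c l ih =>
    intro p cur out
    simp only [List.foldl_cons, triStep, win, lastTwo, ih, List.append_assoc]
    rfl

theorem win_tri (l : List Char) : ∀ (p cur : Char),
    win p cur l ++ [String.ofList [(lastTwo p cur l).1, (lastTwo p cur l).2, '*']]
      = tri p (cur :: l) := by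
  induction l with
  | nil => intro p cur; simp [win, lastTwo, tri]
  | cons c l ih =>
    intro p cur
    simp only [win, lastTwo, List.cons_append, ih, tri, List.headD]

theorem alt_eq_tri (cs : List Char) : trigramize_alt (String.ofList cs) = tri '*' cs := by
  cases cs with
  | nil => rfl
  | cons c l =>
    unfold trigramize_alt
    simp only [String.toList_ofList, List.foldl_cons]
    have h1 : triStep (([], none, '*') : List String × Option Char × Char) c = ([], some '*', c) := rfl
    rw [h1, fold_inv]
    simpa using win_tri l '*' c

theorem zw_cons (p c : Char) (l : List Char) :
    zw p (c :: l) = String.ofList [p, c, l.headD '*'] :: zw c l := by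
  cases l <;> simp [zw]

theorem tri_eq_zw (cs : List Char) : ∀ (p : Char), tri p cs = zw p cs := by
  induction cs with
  | nil => intro p; simp [tri, zw]
  | cons c l ih => intro p; rw [tri, zw_cons, ih]

theorem trigramize_eq_zw (cs : List Char) :
    trigramize (String.ofList cs) = zw '*' cs := by
  unfold trigramize zw
  simp only [String.toList_ofList]
  rw [PySem.List.foldl_append_singleton_eq_map]
  have key : ∀ (k : Nat) (hk : k < cs.length + 2), (('*' :: cs) ++ ['*'])[k]'(by simp; omega) =
      if k = 0 then '*' else if k = cs.length + 1 then '*' else cs.getD (k-1) ' ' := by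
    intro k hk
    by_cases hk1 : k < cs.length + 1
    · rw [List.getElem_append_left (by simpa using hk1)]
      rcases k with _ | j
      · simp
      · rw [List.getElem_cons_succ, if_neg (Nat.succ_ne_zero j), if_neg (by omega)]
        simp only [Nat.add_sub_cancel]
        rw [List.getD_eq_getElem _ _ (by omega)]
    · have hke : k = cs.length + 1 := by omega
      rw [List.getElem_append_right (by simp; omega)]
      simp [hke]
  apply List.ext_getElem
  · simp [PySem.List.length_enumerate]; omega
  · intro i h1 h2
    have hn : i < cs.length := by
      simpa [PySem.List.length_enumerate] using h1
    simp only [List.nil_append, List.getElem_map, List.getElem_zip, List.getElem_tail]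
    have henum : (PySem.List.enumerate cs)[i]'(by
        simpa [PySem.List.length_enumerate] using hn) = ((i : Int), cs.getD i ' ') := by
      rw [List.getD_eq_getElem _ _ hn]
      simpa using PySem.List.getElem_enumerate (xs := cs) (s := 0) (k := i)
        (h := by simpa [PySem.List.length_enumerate] using hn)
    rw [henum]
    dsimp only
    simp only [key i (by omega), key (i+1) (by omega), key (i+1+1) (by omega)]
    congr 1
    rw [if_neg (by omega : ¬ i + 1 = 0), if_neg (by omega : ¬ i + 1 = cs.length + 1)]
    by_cases h0 : i = 0 <;> by_cases hl : i = cs.length - 1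
    · -- single-character word
      rw [if_pos (show (i:Int) = 0 by omega), if_pos (show (i:Int) = (cs.length:Int) - 1 by omega),
        if_pos h0, if_neg (show ¬ i + 1 + 1 = 0 by omega),
        if_pos (show i + 1 + 1 = cs.length + 1 by omega)]
      simp
    · -- first position of a longer word
      rw [if_pos (show (i:Int) = 0 by omega), if_neg (show ¬ (i:Int) = (cs.length:Int) - 1 by omega),
        if_pos h0, if_neg (show ¬ i + 1 + 1 = 0 by omega),
        if_neg (show ¬ i + 1 + 1 = cs.length + 1 by omega),
        (show (i:Int) + 1 = ((i + 1 : Nat) : Int) by push_cast; ring), PySem.List.pyGetD_natCast]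
      simp
    · -- last position of a longer word
      rw [if_neg (show ¬ (i:Int) = 0 by omega), if_pos (show (i:Int) = (cs.length:Int) - 1 by omega),
        if_neg h0, if_neg (show ¬ i = cs.length + 1 by omega),
        if_neg (show ¬ i + 1 + 1 = 0 by omega), if_pos (show i + 1 + 1 = cs.length + 1 by omega),
        (show (i:Int) - 1 = ((i - 1 : Nat) : Int) by omega), PySem.List.pyGetD_natCast]
      simp
    · -- interior position
      rw [if_neg (show ¬ (i:Int) = 0 by omega), if_neg (show ¬ (i:Int) = (cs.length:Int) - 1 by omega),
        if_neg h0, if_neg (show ¬ i = cs.length + 1 by omega),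
        if_neg (show ¬ i + 1 + 1 = 0 by omega), if_neg (show ¬ i + 1 + 1 = cs.length + 1 by omega),
        (show (i:Int) - 1 = ((i - 1 : Nat) : Int) by omega),
        (show (i:Int) + 1 = ((i + 1 : Nat) : Int) by push_cast; ring),
        PySem.List.pyGetD_natCast, PySem.List.pyGetD_natCast]
      simp

-- ===== VERDICT (by name: the statement is the Claim_ definition above) =====
theorem trigramize_spec : Claim_equal_trigramize := by
  intro word _
  unfold Spec_trigramize
  have hA := trigramize_eq_zw word.toList
  have hB := alt_eq_tri word.toList
  have hT := tri_eq_zw word.toList '*'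
  simp only [String.ofList_toList] at hA hB
  rw [hA, hB, hT]
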